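-- pv_equiv track=rewrite | github.com/Aehlius/CS-UY_1134 | HW/HW1/ia913_hw01.py | add_borders
-- ===== SOURCE A (Python) =====
-- def add_borders(matrix):
--     # creates a new matrix based on existing matrix, but with added borders around
--     rows = len(matrix)
--     columns = len(matrix[0])
--     border_matrix = []
--     top_bottom = [0] * (columns+2)      # list to be attached to top&bottom of matrix
--     border_matrix.append(top_bottom)
--     for i in range(rows):
--         row = [0]
--         for j in range(columns):
--             row.append(matrix[i][j])
--         row.append(0)
--         border_matrix.append(row)
--     border_matrix.append(top_bottom)
--     return border_matrix
-- ===== SOURCE B (Python) =====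
-- def add_borders(matrix):
--     # creates a new matrix based on existing matrix, but with added borders around
--     columns = len(matrix[0])
--
--     def pad(grid, width):
--         zero_row = [0] * width
--         return [zero_row] + grid + [zero_row]
--
--     # Pad with zero rows, transpose, pad with zero rows again (which adds the
--     # zero columns), and transpose back.
--     transposed = [list(column) for column in zip(*pad([row[:columns] for row in matrix], columns))]
--     return [list(column) for column in zip(*pad(transposed, len(matrix) + 2))]
-- ===== Notes on version B (the rewrite author's own statement) =====
-- stated objective: alternative
-- what changed: B builds the border by a different algorithm: it pads the grid with zero rows, transposes via zip(*...), pads with zero rows again (which adds the zero columns), and transposes back, instead of A's index-driven append loops over rows and columns.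
import Mathlib
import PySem

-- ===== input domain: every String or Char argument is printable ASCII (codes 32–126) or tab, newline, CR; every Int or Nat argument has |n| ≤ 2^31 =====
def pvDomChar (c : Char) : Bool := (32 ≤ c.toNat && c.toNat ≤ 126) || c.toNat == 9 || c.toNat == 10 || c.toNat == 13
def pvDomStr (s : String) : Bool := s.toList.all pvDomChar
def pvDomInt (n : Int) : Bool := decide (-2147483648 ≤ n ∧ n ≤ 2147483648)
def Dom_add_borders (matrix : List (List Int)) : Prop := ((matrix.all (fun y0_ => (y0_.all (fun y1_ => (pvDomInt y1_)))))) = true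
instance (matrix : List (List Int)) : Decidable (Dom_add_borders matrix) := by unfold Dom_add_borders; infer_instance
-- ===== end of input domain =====

-- B adds the zero border by padding with zero rows, transposing, padding again and transposing back
-- (a different algorithm of the same cost); equal return values proved on Pre_.
-- Note: A aliases the top and bottom border rows (same list object); the equivalence is about the
-- returned value, which is identical.

-- ===== PORT A =====
def add_borders (matrix : List (List Int)) : List (List Int) :=
  let rows := matrix.length
  let columns := (PySem.List.pyGetD matrix (0 : Int) []).length
  let top_bottom : List Int := List.replicate (columns + 2) 0
  let border_matrix : List (List Int) := [top_bottom]
  let border_matrix := (List.range rows).foldl (fun acc (i : Nat) =>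
      let row := (List.range columns).foldl (fun r (j : Nat) =>
          r ++ [PySem.List.pyGetD (PySem.List.pyGetD matrix (i : Int) []) (j : Int) 0]) [0]
      acc ++ [row ++ [0]]) border_matrix
  border_matrix ++ [top_bottom]

-- ===== PORT B =====
-- Port of Source B's helper 'pad'.
def pvPad (grid : List (List Int)) (width : Nat) : List (List Int) :=
  let zero_row : List Int := List.replicate width 0
  [zero_row] ++ grid ++ [zero_row]

-- Termination helpers for the hand-ported zip(*grid) (cited by pvZipStar's decreasing_by).
theorem pvZip_tail_sum_le (g : List (List Int)) :
    ((g.map List.tail).map List.length).sum ≤ (g.map List.length).sum := by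
  induction g with
  | nil => simp
  | cons a t ih =>
    simp only [List.map_cons, List.sum_cons]
    have : a.tail.length ≤ a.length := by cases a <;> simp
    omega

theorem pvZip_dec (a : List Int) (t : List (List Int)) (ha : a ≠ []) :
    (((a :: t).map List.tail).map List.length).sum < (((a :: t)).map List.length).sum := by
  simp only [List.map_cons, List.sum_cons]
  have h1 : a.tail.length < a.length := by cases a with | nil => exact absurd rfl ha | cons x xs => simp
  have h2 := pvZip_tail_sum_le t
  omega

-- Hand port of Python's zip(*grid) (exact: stops when any list is exhausted; with no lists, yields nothing).
def pvZipStar (grid : List (List Int)) : List (List Int) :=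
  match grid with
  | [] => []
  | a :: t =>
    if _he : (a :: t).any (fun r => r.isEmpty) then []
    else (a :: t).map (fun r => r.headD 0) :: pvZipStar ((a :: t).map List.tail)
termination_by (grid.map List.length).sum
decreasing_by
  exact pvZip_dec a t (by
    intro hnil
    exact _he (by simp [hnil]))

def add_borders_alt (matrix : List (List Int)) : List (List Int) :=
  let columns := (PySem.List.pyGetD matrix (0 : Int) []).length
  let transposed := pvZipStar (pvPad
      (matrix.map (fun row => PySem.List.slice row none (some (columns : Int)))) columns)
  pvZipStar (pvPad transposed (matrix.length + 2))

-- ===== PRECONDITION & SPEC =====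
-- Pre_ excludes exactly the inputs on which A raises IndexError: the empty matrix
-- (len(matrix[0])) and matrices where some row is shorter than the first row
-- (matrix[i][j] out of range).
def Pre_add_borders (matrix : List (List Int)) : Prop :=
  matrix ≠ [] ∧ ∀ row ∈ matrix, (matrix.getD 0 []).length ≤ row.length
instance (matrix : List (List Int)) : Decidable (Pre_add_borders matrix) := by
  unfold Pre_add_borders; infer_instance
def pvWitness_add_borders : List (List Int) := [[1, 2], [3, 4]]

def Spec_add_borders (matrix : List (List Int)) (out : List (List Int)) : Prop := out = add_borders_alt matrix
instance (matrix : List (List Int)) (out : List (List Int)) : Decidable (Spec_add_borders matrix out) := by unfold Spec_add_borders; infer_instance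

-- ===== CLAIM (what is proved, stated in full; the proofs are below) =====
def Claim_equal_add_borders : Prop := ∀ (matrix : List (List Int)), Dom_add_borders matrix → Pre_add_borders matrix → Spec_add_borders matrix (add_borders matrix)

-- ===== LEMMAS AND PROOFS =====

/-- A foldl that appends one element per index equals init ++ the mapped range. -/
theorem pv_foldl_app {α : Type} (f : Nat → α) (init : List α) (n : Nat) :
    (List.range n).foldl (fun r (j : Nat) => r ++ [f j]) init = init ++ (List.range n).map f := by
  induction n with
  | zero => simp
  | succ n ih => simp [List.range_succ, ih]

/-- Mapping safe indexing over range c recovers take c. -/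
theorem pv_map_range_take (row : List Int) (c : Nat) (hc : c ≤ row.length) :
    (List.range c).map (fun (j : Nat) => PySem.List.pyGetD row (j : Int) 0) = row.take c := by
  apply List.ext_getElem
  · simp [hc]
  · intro i h1 h2
    simp only [List.getElem_map, List.getElem_range, List.getElem_take,
      PySem.List.pyGetD_natCast]
    simp at h1
    rw [List.getD_eq_getElem _ _ (by omega)]

theorem pvPad_eq (g : List (List Int)) (w : Nat) :
    pvPad g w = [List.replicate w 0] ++ g ++ [List.replicate w 0] := rfl

/-- Characterisation of pvZipStar on a rectangular nonempty grid of width w. -/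
theorem pvZipStar_rect (w : Nat) : ∀ (g : List (List Int)), g ≠ [] →
    (∀ r ∈ g, r.length = w) →
    pvZipStar g = (List.range w).map (fun j => g.map (fun r => r.getD j 0)) := by
  induction w with
  | zero =>
    intro g hne hw
    cases g with
    | nil => exact absurd rfl hne
    | cons a t =>
      have hany : (a :: t).any (fun r => r.isEmpty) = true := by
        simp only [List.any_eq_true]
        exact ⟨a, by simp, by simpa using List.length_eq_zero_iff.mp (hw a (by simp))⟩
      rw [pvZipStar, dif_pos hany]
      simp
  | succ w ih =>
    intro g hne hw
    cases g with
    | nil => exact absurd rfl hne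
    | cons a t =>
      have hnone : ¬ ((a :: t).any (fun r => r.isEmpty) = true) := by
        simp only [List.any_eq_true, not_exists, not_and]
        intro r hr h0
        have := hw r hr
        rw [List.isEmpty_iff.mp h0] at this
        simp at this
      have htail : pvZipStar ((a :: t).map List.tail)
          = (List.range w).map (fun j => ((a :: t).map List.tail).map (fun r => r.getD j 0)) := by
        apply ih
        · simp
        · intro r hr
          obtain ⟨s, hs, rfl⟩ := List.mem_map.mp hr
          have := hw s hs
          cases s with
          | nil => simp at this
          | cons x xs => simpa using this
      have hhead : (a :: t).map (fun r => r.headD 0) = (a :: t).map (fun r => r.getD 0 0) := by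
        apply List.map_congr_left
        intro r hr
        have := hw r hr
        cases r with
        | nil => simp at this
        | cons x xs => simp
      have htails : ∀ j : Nat, ((a :: t).map List.tail).map (fun r => r.getD j 0)
          = (a :: t).map (fun r => r.getD (j + 1) 0) := by
        intro j
        rw [List.map_map]
        apply List.map_congr_left
        intro r hr
        have := hw r hr
        cases r with
        | nil => simp at this
        | cons x xs => simp
      rw [pvZipStar, dif_neg hnone, htail, hhead]
      conv_rhs => rw [List.range_succ_eq_map, List.map_cons, List.map_map]
      congr 1
      apply List.map_congr_left
      intro j _
      simp only [Function.comp]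
      exact htails j

/-- Mapping a function of getD over the full range of indices equals mapping over the list. -/
theorem pv_range_getD_map {α β : Type} (l : List α) (d : α) (h : α → β) :
    (List.range l.length).map (fun j => h (l.getD j d)) = l.map h := by
  apply List.ext_getElem
  · simp
  · intro i h1 h2
    simp only [List.getElem_map, List.getElem_range]
    rw [List.getD_eq_getElem _ _ (by simpa using h2)]

theorem pv_range_getD (l : List Int) :
    (List.range l.length).map (fun j => l.getD j 0) = l := by
  simpa using pv_range_getD_map l 0 id

theorem add_borders_spec : Claim_equal_add_borders := by
  intro matrix _ hpre
  obtain ⟨hne, hrows⟩ := hpre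
  unfold Spec_add_borders add_borders add_borders_alt
  simp only []
  set c := (PySem.List.pyGetD matrix (0 : Int) []).length with hcdef
  have hc' : c = (matrix.getD 0 []).length := by
    simp [hcdef, PySem.List.pyGetD_zero]
  -- A-side: closed form
  have hA : (List.range matrix.length).foldl (fun acc (i : Nat) =>
        acc ++ [((List.range c).foldl (fun r (j : Nat) =>
          r ++ [PySem.List.pyGetD (PySem.List.pyGetD matrix (i : Int) []) (j : Int) 0]) [0]) ++ [0]])
        [List.replicate (c + 2) 0]
      = [List.replicate (c + 2) 0] ++ matrix.map (fun row => 0 :: (row.take c ++ [0])) := by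
    rw [pv_foldl_app]
    congr 1
    apply List.ext_getElem
    · simp
    · intro i h1 h2
      simp only [List.getElem_map, List.getElem_range]
      simp at h1
      have hm : PySem.List.pyGetD matrix (i : Int) [] = matrix[i] := by
        simp [PySem.List.pyGetD_natCast, List.getElem?_eq_getElem h1]
      rw [pv_foldl_app, hm, pv_map_range_take _ c
          (by rw [hc']; exact hrows _ (List.getElem_mem h1))]
      simp
  rw [hA]
  -- B-side
  set trimmed := matrix.map (fun row => PySem.List.slice row none (some (c : Int))) with htr
  have htrim : trimmed = matrix.map (fun row => row.take c) := by
    rw [htr]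
    apply List.map_congr_left
    intro row _
    exact PySem.List.slice_to_natCast row c
  have htrlen : ∀ r ∈ trimmed, r.length = c := by
    rw [htrim]
    intro r hr
    obtain ⟨s, hs, rfl⟩ := List.mem_map.mp hr
    have hcs : c ≤ s.length := by rw [hc']; exact hrows s hs
    rw [List.length_take]
    exact Nat.min_eq_left hcs
  set P1 := pvPad trimmed c with hP1
  have hP1len : ∀ r ∈ P1, r.length = c := by
    intro r hr
    rw [hP1, pvPad_eq] at hr
    simp only [List.mem_append, List.mem_cons, List.not_mem_nil, or_false] at hr
    rcases hr with (h | h) | h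
    · rw [h]; simp
    · exact htrlen r h
    · rw [h]; simp
  have hP1ne : P1 ≠ [] := by rw [hP1, pvPad_eq]; simp
  have ht : pvZipStar P1 = (List.range c).map (fun j => P1.map (fun r => r.getD j 0)) :=
    pvZipStar_rect c P1 hP1ne hP1len
  set R := matrix.length + 2 with hR
  have hP1full : P1.length = R := by
    rw [hP1, pvPad_eq, hR]; simp [htr]
  have httlen : ∀ r ∈ pvZipStar P1, r.length = R := by
    rw [ht]
    intro r hr
    obtain ⟨j, _, rfl⟩ := List.mem_map.mp hr
    simp [hP1full]
  have hpad2len : ∀ r ∈ pvPad (pvZipStar P1) R, r.length = R := by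
    intro r hr
    rw [pvPad_eq] at hr
    simp only [List.mem_append, List.mem_cons, List.not_mem_nil, or_false] at hr
    rcases hr with (h | h) | h
    · rw [h]; simp
    · exact httlen r h
    · rw [h]; simp
  have hpad2ne : pvPad (pvZipStar P1) R ≠ [] := by rw [pvPad_eq]; simp
  rw [pvZipStar_rect R (pvPad (pvZipStar P1) R) hpad2ne hpad2len]
  -- each output row i equals 0 :: P1.getD i [] ++ [0]
  have hrow : ∀ i ∈ List.range R, (pvPad (pvZipStar P1) R).map (fun r => r.getD i 0)
      = 0 :: (P1.getD i [] ++ [0]) := by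
    intro i hi
    have hi : i < R := by simpa using hi
    rw [pvPad_eq]
    simp only [List.map_append, List.map_cons, List.map_nil]
    have hz : (List.replicate R (0 : Int)).getD i 0 = 0 := by
      rw [List.getD_eq_getElem _ _ (by simp [hi])]; simp
    rw [hz]
    show 0 :: ((pvZipStar P1).map (fun r => r.getD i 0) ++ [0]) = 0 :: (P1.getD i [] ++ [0])
    congr 1
    rw [ht, List.map_map]
    have heq : (List.range c).map ((fun r => r.getD i 0) ∘ fun j => P1.map (fun r => r.getD j 0))
        = (List.range c).map (fun j => (P1.getD i []).getD j 0) := by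
      apply List.map_congr_left
      intro j _
      simp only [Function.comp]
      have hi' : i < P1.length := by omega
      rw [List.getD_eq_getElem (P1.map _) _ (by simpa using hi'),
          List.getElem_map, List.getD_eq_getElem _ _ hi']
    rw [heq]
    have hlen : (P1.getD i []).length = c := by
      have hi' : i < P1.length := by omega
      rw [List.getD_eq_getElem _ _ hi']
      exact hP1len _ (List.getElem_mem hi')
    rw [← hlen, pv_range_getD]
  rw [List.map_congr_left hrow]
  -- rewrite the range-map over getD as a direct map over P1
  have hRmap : (List.range R).map (fun i => (0 : Int) :: (P1.getD i [] ++ [0]))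
      = P1.map (fun r => 0 :: (r ++ [0])) := by
    rw [← hP1full]
    exact pv_range_getD_map P1 [] (fun r => 0 :: (r ++ [0]))
  rw [hRmap, hP1, pvPad_eq, htrim]
  simp only [List.map_append, List.map_cons, List.map_nil, List.map_map]
  have hborder : List.replicate (c + 2) (0 : Int) = 0 :: (List.replicate c 0 ++ [0]) := by
    rw [show c + 2 = c + 1 + 1 from rfl, List.replicate_succ, List.replicate_succ']
  rw [hborder]
  simp [Function.comp]
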